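-- pv_equiv track=rewrite | github.com/wojciechzyla/projekt-mb | found/functions.py | get_to_char_map
-- ===== SOURCE A (Python) =====
-- from typing import Iterable
--
-- def get_to_char_map(iterable: Iterable) -> dict[str, str]:
--     res = {}
--     letter = 'a'
--     for x in iterable:
--         if not x in res:
--             res[x] = letter
--             letter = chr(ord(letter)+1)
--     return res
-- ===== SOURCE B (Python) =====
-- def get_to_char_map(iterable):
--     lst = list(iterable)
--     return {x: chr(ord('a') + len(set(lst[:i])))
--             for i, x in enumerate(lst) if x not in lst[:i]}
-- ===== Notes on version B (the rewrite author's own statement) =====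
-- stated objective: alternative
-- what changed: B keeps no running state at all: for each position it decides locally whether it is a first occurrence (x not in lst[:i]) and computes that element's letter independently as 'a' plus the number of distinct elements in the preceding prefix (len(set(lst[:i]))), a stateless nested-pass rank computation instead of A's single pass threading a mutable dict and letter counter.
import Mathlib
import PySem

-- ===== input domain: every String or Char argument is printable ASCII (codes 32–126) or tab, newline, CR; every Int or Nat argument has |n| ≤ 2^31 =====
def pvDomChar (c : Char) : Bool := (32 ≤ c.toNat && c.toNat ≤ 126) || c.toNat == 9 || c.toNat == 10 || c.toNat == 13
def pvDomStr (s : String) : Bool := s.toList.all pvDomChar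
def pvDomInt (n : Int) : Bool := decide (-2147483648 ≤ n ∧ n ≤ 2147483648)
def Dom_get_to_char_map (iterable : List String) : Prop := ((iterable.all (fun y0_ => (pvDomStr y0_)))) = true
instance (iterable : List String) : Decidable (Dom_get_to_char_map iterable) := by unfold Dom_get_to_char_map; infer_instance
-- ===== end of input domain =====

-- B is a stateless nested-pass alternative: each first occurrence gets 'a' + (distinct count of its prefix), replacing A's threaded dict/letter state.

-- ===== PORT A =====
-- the letter variable is carried as its code point (ord 'a' = 97); chr(n) = String.ofList [Char.ofNat n]
def get_to_char_map (iterable : List String) : List (String × String) :=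
  (iterable.foldl
    (fun (st : PySem.Dict String String × Nat) x =>
      if st.1.contains x then st
      else (st.1.insert x (String.ofList [Char.ofNat st.2]), st.2 + 1))
    (PySem.Dict.empty, 97)).1.items

-- ===== PORT B =====
-- lst[:i] with i the (nonnegative) enumerate index is exactly List.take i.toNat; set(lst[:i]) is PySem.Set.ofList
def get_to_char_map_alt (iterable : List String) : List (String × String) :=
  (PySem.List.enumerate iterable 0).filterMap (fun p =>
    if (iterable.take p.1.toNat).contains p.2 then none
    else some (p.2, String.ofList [Char.ofNat (97 + (PySem.Set.ofList (iterable.take p.1.toNat)).length)]))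

-- ===== PRECONDITION & SPEC =====
def Spec_get_to_char_map (iterable : List String) (out : List (String × String)) : Prop := out = get_to_char_map_alt iterable
instance (iterable : List String) (out : List (String × String)) : Decidable (Spec_get_to_char_map iterable out) := by unfold Spec_get_to_char_map; infer_instance

-- ===== CLAIM (what is proved, stated in full; the proofs are below) =====
def Claim_equal_get_to_char_map : Prop := ∀ (iterable : List String), Dom_get_to_char_map iterable → Spec_get_to_char_map iterable (get_to_char_map iterable)

-- ===== LEMMAS AND PROOFS =====

def pvF (p : Int × String) : String × String := (p.2, String.ofList [Char.ofNat (97 + p.1.toNat)])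

-- A's loop invariant: items of the dict are the enumerate-map of its keys
lemma pv_main : ∀ (l : List String) (d : PySem.Dict String String),
    d.items = (PySem.List.enumerate d.keys 0).map pvF →
    (l.foldl
      (fun (st : PySem.Dict String String × Nat) x =>
        if st.1.contains x then st
        else (st.1.insert x (String.ofList [Char.ofNat st.2]), st.2 + 1))
      (d, 97 + d.size)).1.items
      = (PySem.List.enumerate (PySem.Set.update d.keys l) 0).map pvF := by
  intro l
  induction l with
  | nil => intro d h; simpa [PySem.Set.update] using h
  | cons x t ih =>
    intro d h
    simp only [List.foldl_cons]
    by_cases hc : d.contains x = true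
    · have hk : x ∈ d.keys := (PySem.Dict.contains_iff_mem_keys d x).mp hc
      have hadd : PySem.Set.add d.keys x = d.keys := by
        simp only [PySem.Set.add]
        rw [if_pos ((PySem.Set.contains_iff d.keys x).mpr hk)]
      rw [if_pos hc]
      have := ih d h
      simpa [PySem.Set.update, List.foldl_cons, hadd] using this
    · have hc' : d.contains x = false := by simpa using hc
      rw [if_neg (by simp [hc'])]
      have hkeys : (d.insert x (String.ofList [Char.ofNat (97 + d.size)])).keys = d.keys ++ [x] :=
        PySem.Dict.keys_insert_of_not_contains d _ hc'
      have hitems : (d.insert x (String.ofList [Char.ofNat (97 + d.size)])).items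
          = d.items ++ [(x, String.ofList [Char.ofNat (97 + d.size)])] :=
        PySem.Dict.items_insert_of_not_contains d _ hc'
      have hlen : d.keys.length = d.size := by
        simp [PySem.Dict.keys, PySem.Dict.size]
      have hinv : (d.insert x (String.ofList [Char.ofNat (97 + d.size)])).items
          = (PySem.List.enumerate (d.insert x (String.ofList [Char.ofNat (97 + d.size)])).keys 0).map pvF := by
        rw [hitems, hkeys, PySem.List.enumerate_append, List.map_append, ← h]
        simp [PySem.List.enumerate_cons, PySem.List.enumerate_nil, pvF, hlen]
      have hsz : (d.insert x (String.ofList [Char.ofNat (97 + d.size)])).size = d.size + 1 := by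
        rw [PySem.Dict.size_insert, if_neg (by simp [hc'])]
      have := ih (d.insert x (String.ofList [Char.ofNat (97 + d.size)])) hinv
      rw [hsz] at this
      have harr : 97 + d.size + 1 = 97 + (d.size + 1) := by omega
      rw [harr, this, hkeys]
      have hnotmem : x ∉ d.keys := fun hm => by
        simp [(PySem.Dict.contains_iff_mem_keys d x).mpr hm] at hc'
      have hadd : PySem.Set.add d.keys x = d.keys ++ [x] := by
        simp only [PySem.Set.add]
        rw [if_neg (fun hcc => hnotmem ((PySem.Set.contains_iff d.keys x).mp hcc))]
      simp [PySem.Set.update, List.foldl_cons, hadd]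

-- Set.update only appends
lemma pv_update_prefix {α : Type} [BEq α] : ∀ (t s : List α), ∃ r, PySem.Set.update s t = s ++ r := by
  intro t
  induction t with
  | nil => intro s; exact ⟨[], by simp [PySem.Set.update]⟩
  | cons x t ih =>
    intro s
    have hstep : PySem.Set.update s (x :: t) = PySem.Set.update (PySem.Set.add s x) t := by
      simp [PySem.Set.update]
    by_cases hc : PySem.Set.contains s x = true
    · have hadd : PySem.Set.add s x = s := by simp only [PySem.Set.add]; rw [if_pos hc]
      obtain ⟨r, hr⟩ := ih s
      exact ⟨r, by rw [hstep, hadd, hr]⟩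
    · have hadd : PySem.Set.add s x = s ++ [x] := by
        simp only [PySem.Set.add]; rw [if_neg hc]
      obtain ⟨r, hr⟩ := ih (s ++ [x])
      exact ⟨x :: r, by rw [hstep, hadd, hr]; simp⟩

-- B's comprehension over the suffix, given the processed prefix, yields the new elements mapped by pvF
-- B's comprehension body, named for the proofs (definitionally the lambda in the port)
def pvG (full : List String) (p : Int × String) : Option (String × String) :=
  if (full.take p.1.toNat).contains p.2 then none
  else some (p.2, String.ofList [Char.ofNat (97 + (PySem.Set.ofList (full.take p.1.toNat)).length)])

lemma pv_alt_eq (l : List String) :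
    get_to_char_map_alt l = (PySem.List.enumerate l 0).filterMap (pvG l) := rfl

lemma pv_b : ∀ (suffix pre full : List String), pre ++ suffix = full →
    (PySem.List.enumerate suffix (pre.length : Int)).filterMap (pvG full)
      = ((PySem.List.enumerate ((PySem.Set.update (PySem.Set.ofList pre) suffix).drop (PySem.Set.ofList pre).length)
          ((PySem.Set.ofList pre).length : Int))).map pvF := by
  intro suffix
  induction suffix with
  | nil =>
    intro pre full _
    simp [PySem.List.enumerate_nil, PySem.Set.update]
  | cons x t ih =>
    intro pre full hfull
    have htake : full.take ((pre.length : Int)).toNat = pre := by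
      rw [← hfull]; simp
    rw [PySem.List.enumerate_cons]
    have hstep : ∀ s : PySem.Set String, PySem.Set.update s (x :: t) = PySem.Set.update (PySem.Set.add s x) t := by
      intro s; simp [PySem.Set.update]
    by_cases hm : x ∈ pre
    · -- not a first occurrence: skipped, set unchanged
      have hcontains : pre.contains x = true := by simpa using hm
      have hnone : pvG full ((pre.length : Int), x) = none := by
        simp only [pvG, htake]
        rw [if_pos hcontains]
      rw [List.filterMap_cons_none hnone]
      have hadd : PySem.Set.add (PySem.Set.ofList pre) x = PySem.Set.ofList pre := by
        simp only [PySem.Set.add]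
        rw [if_pos ((PySem.Set.contains_iff _ x).mpr ((PySem.Set.mem_ofList pre x).mpr hm))]
      have hof : PySem.Set.ofList (pre ++ [x]) = PySem.Set.ofList pre := by
        rw [PySem.Set.ofList_eq_foldl, List.foldl_append, ← PySem.Set.ofList_eq_foldl]
        simpa using hadd
      have := ih (pre ++ [x]) full (by simpa using hfull)
      rw [hof] at this
      rw [hstep, hadd, ← this]
      congr 1
      simp
    · -- first occurrence: emitted with letter 97 + |set(prefix)|
      have hcontains : pre.contains x = false := by simpa using hm
      have hsome : pvG full ((pre.length : Int), x)
          = some (x, String.ofList [Char.ofNat (97 + (PySem.Set.ofList pre).length)]) := by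
        simp only [pvG, htake]
        rw [if_neg (by simpa using hm)]
      rw [List.filterMap_cons_some hsome]
      have hadd : PySem.Set.add (PySem.Set.ofList pre) x = PySem.Set.ofList pre ++ [x] := by
        simp only [PySem.Set.add]
        rw [if_neg (fun hcc => hm ((PySem.Set.mem_ofList pre x).mp ((PySem.Set.contains_iff _ x).mp hcc)))]
      have hof : PySem.Set.ofList (pre ++ [x]) = PySem.Set.ofList pre ++ [x] := by
        rw [PySem.Set.ofList_eq_foldl, List.foldl_append, ← PySem.Set.ofList_eq_foldl]
        simpa using hadd
      obtain ⟨r, hr⟩ := pv_update_prefix t (PySem.Set.ofList pre ++ [x])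
      have hdrop : (PySem.Set.ofList pre ++ [x] ++ r).drop (PySem.Set.ofList pre ++ [x]).length = r :=
        List.drop_left' rfl
      have := ih (pre ++ [x]) full (by simpa using hfull)
      rw [hof, hr, hdrop] at this
      have hupd : PySem.Set.update (PySem.Set.ofList pre) (x :: t)
          = PySem.Set.ofList pre ++ x :: r := by
        rw [hstep _, hadd, hr]; simp
      have hdrop2 : (PySem.Set.ofList pre ++ x :: r).drop (PySem.Set.ofList pre).length = x :: r := by
        have h1 : PySem.Set.ofList pre ++ x :: r = PySem.Set.ofList pre ++ (x :: r) := rfl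
        rw [h1]; exact List.drop_left' rfl
      rw [hupd, hdrop2, PySem.List.enumerate_cons, List.map_cons, List.cons_eq_cons]
      constructor
      · simp [pvF]
      · simpa using this

-- ===== VERDICT (by name: the statement is the Claim_ definition above) =====
theorem get_to_char_map_spec : Claim_equal_get_to_char_map := by
  intro iterable _
  show get_to_char_map iterable = get_to_char_map_alt iterable
  have h0 : (PySem.Dict.empty : PySem.Dict String String).items
      = (PySem.List.enumerate (PySem.Dict.empty : PySem.Dict String String).keys 0).map pvF := by
    simp [PySem.Dict.empty, PySem.Dict.keys, PySem.List.enumerate_nil]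
  have hA := pv_main iterable PySem.Dict.empty h0
  have hsz : (PySem.Dict.empty : PySem.Dict String String).size = 0 := by
    simp [PySem.Dict.empty, PySem.Dict.size]
  rw [hsz] at hA
  have hB := pv_b iterable [] iterable rfl
  unfold get_to_char_map
  rw [pv_alt_eq]
  simp only [List.length_nil, Nat.cast_zero] at hB
  rw [hB, hA]
  have hkeys : (PySem.Dict.empty : PySem.Dict String String).keys = [] := by
    simp [PySem.Dict.empty, PySem.Dict.keys]
  rw [hkeys]
  have hof : (PySem.Set.ofList ([] : List String)) = ([] : List String) := rfl
  rw [hof]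
  simp
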